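-- pv_equiv track=rewrite | github.com/ndebuhr/thermo-state-solver | thermo_utils.py | letter_incrementer
-- ===== SOURCE A (Python) =====
-- def letter_incrementer(size):
--     result = []
--     letters = 'ABCDEFGHIJKLMNOPQRSTUVWXYZ'
--     letList = list(letters)
--     for point in range(0,size):
--         if point/26 >= 1:
--             let1 = math.floor(point/26)-1
--             let2 = point%26
--             result.append(letList[let1]+letList[let2])
--         else:
--             result.append(letList[point])
--     return result
-- ===== SOURCE B (Python) =====
-- def letter_incrementer(size):
--     letters = 'ABCDEFGHIJKLMNOPQRSTUVWXYZ'
--     table = list(letters) + [a + b for a in letters for b in letters]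
--     return [table[p] for p in range(size)]
-- ===== Notes on version B (the rewrite author's own statement) =====
-- stated objective: simpler
-- what changed: B precomputes the full 702-entry label table ('A'..'Z' then 'AA'..'ZZ' via a double comprehension) and the result is a plain table lookup per position, eliminating A's per-element branch, floor-division and modulo arithmetic.
-- crash fix: For 27 <= size <= 702 A raises NameError (the module never imports math, so math.floor fails at point 26) while B returns the label list for that size. — e.g. on letter_incrementer(28): A raises NameError, B returns ["A","B","C","D","E","F","G","H","I","J","K","L","M","N","O","P","Q","R","S","T","U","V","W","X","Y","Z","AA","AB"]
import Mathlib
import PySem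

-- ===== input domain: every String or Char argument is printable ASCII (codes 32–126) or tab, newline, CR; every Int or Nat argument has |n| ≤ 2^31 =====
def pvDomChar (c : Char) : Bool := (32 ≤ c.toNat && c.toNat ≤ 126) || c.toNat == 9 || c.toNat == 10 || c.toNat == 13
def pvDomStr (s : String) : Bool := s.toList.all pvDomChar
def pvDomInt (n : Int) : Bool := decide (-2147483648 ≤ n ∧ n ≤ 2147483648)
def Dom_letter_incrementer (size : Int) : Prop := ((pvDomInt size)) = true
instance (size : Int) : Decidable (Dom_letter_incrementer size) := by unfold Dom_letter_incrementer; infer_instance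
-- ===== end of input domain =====

-- B replaces A's per-element branch/divmod arithmetic by one precomputed 702-entry label table and a lookup per position (objective: simpler).

-- ===== PORT A =====
def letter_incrementer (size : Int) : List String :=
  let letters : List Char := "ABCDEFGHIJKLMNOPQRSTUVWXYZ".toList
  let letList : List String := letters.map (fun c => String.mk [c])
  (PySem.List.pyRange 0 size 1).foldl (fun result point =>
    -- 'point/26 >= 1' (true division) on the nonnegative ints from range(0,size) is 26 ≤ point
    if 26 ≤ point then
      let let1 : Int := PySem.Int.floordiv point 26 - 1  -- math.floor(point/26)-1, exact on these ints
      let let2 : Int := PySem.Int.mod point 26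
      result ++ [(PySem.List.pyGet? letList let1).getD "" ++ (PySem.List.pyGet? letList let2).getD ""]
    else
      result ++ [(PySem.List.pyGet? letList point).getD ""]) []

-- ===== PORT B =====
def letter_incrementer_alt (size : Int) : List String :=
  let letters : List Char := "ABCDEFGHIJKLMNOPQRSTUVWXYZ".toList
  let table : List String :=
    letters.map (fun c => String.mk [c]) ++
      letters.flatMap (fun a => letters.map (fun b => String.mk [a] ++ String.mk [b]))
  (PySem.List.pyRange 0 size 1).map (fun p => (PySem.List.pyGet? table p).getD "")

-- ===== PRECONDITION & SPEC =====
-- Pre_ excludes exactly size ≥ 27: A as given raises NameError ('math' is not imported) at point 26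
-- (and would raise IndexError past 702); B returns normally up to size 702.
def Pre_letter_incrementer (size : Int) : Prop := size ≤ 26
instance (size : Int) : Decidable (Pre_letter_incrementer size) := by unfold Pre_letter_incrementer; infer_instance
def pvWitness_letter_incrementer : Int := (20)
-- A raises NameError (math is not imported) for 27 ≤ size ≤ 702; B returns the full label list there.
def Raises_letter_incrementer (size : Int) : Prop := 27 ≤ size ∧ size ≤ 702
instance (size : Int) : Decidable (Raises_letter_incrementer size) := by unfold Raises_letter_incrementer; infer_instance
def pvRaiseWitness_letter_incrementer : Int := (28)
def pvRaiseWitnessOut_letter_incrementer : List String :=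
  ["A","B","C","D","E","F","G","H","I","J","K","L","M","N","O","P","Q","R","S","T","U","V","W","X","Y","Z","AA","AB"]
def Spec_letter_incrementer (size : Int) (out : List String) : Prop := out = letter_incrementer_alt size
instance (size : Int) (out : List String) : Decidable (Spec_letter_incrementer size out) := by unfold Spec_letter_incrementer; infer_instance

-- ===== CLAIM (what is proved, stated in full; the proofs are below) =====
def Claim_equal_letter_incrementer : Prop := ∀ (size : Int), Dom_letter_incrementer size → Pre_letter_incrementer size → Spec_letter_incrementer size (letter_incrementer size)
def Claim_raises_letter_incrementer : Prop := (∀ (size : Int), Dom_letter_incrementer size → Raises_letter_incrementer size → ¬ Pre_letter_incrementer size) ∧ (Dom_letter_incrementer (pvRaiseWitness_letter_incrementer) ∧ Raises_letter_incrementer (pvRaiseWitness_letter_incrementer) ∧ letter_incrementer_alt (pvRaiseWitness_letter_incrementer) = pvRaiseWitnessOut_letter_incrementer)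

-- ===== LEMMAS AND PROOFS =====

def pvLetters : List Char := "ABCDEFGHIJKLMNOPQRSTUVWXYZ".toList

def pvTable : List String :=
  pvLetters.map (fun c => String.mk [c]) ++
    pvLetters.flatMap (fun a => pvLetters.map (fun b => String.mk [a] ++ String.mk [b]))

-- A's loop body as an element function
def pvElemA (point : Int) : String :=
  if 26 ≤ point then
    (PySem.List.pyGet? (pvLetters.map (fun c => String.mk [c])) (PySem.Int.floordiv point 26 - 1)).getD "" ++
      (PySem.List.pyGet? (pvLetters.map (fun c => String.mk [c])) (PySem.Int.mod point 26)).getD ""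
  else (PySem.List.pyGet? (pvLetters.map (fun c => String.mk [c])) point).getD ""

theorem pv_foldl_if_two {α β : Type} (p : α → Prop) [DecidablePred p] (f g : α → β)
    (l : List α) (acc : List β) :
    l.foldl (fun acc x => if p x then acc ++ [f x] else acc ++ [g x]) acc
      = acc ++ l.map (fun x => if p x then f x else g x) := by
  have : (fun (acc : List β) (x : α) => if p x then acc ++ [f x] else acc ++ [g x])
      = fun acc x => acc ++ [if p x then f x else g x] := by
    funext acc x; split <;> rfl
  rw [this, PySem.List.foldl_append_singleton_eq_map]

theorem pv_A_map (size : Int) :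
    letter_incrementer size = (PySem.List.pyRange 0 size 1).map pvElemA := by
  unfold letter_incrementer
  rw [pv_foldl_if_two (fun point => 26 ≤ point)]
  simp only [List.nil_append]
  rfl

-- indexing a flatMap whose pieces all have the same positive length k
theorem pv_flatMap_getElem? {α β : Type} (xs : List α) (f : α → List β) (k : Nat)
    (hk : 0 < k) (hlen : ∀ a ∈ xs, (f a).length = k) (n : Nat) :
    (xs.flatMap f)[n]? = xs[n / k]?.bind (fun a => (f a)[n % k]?) := by
  induction xs generalizing n with
  | nil => simp
  | cons x xs ih =>
    have hx : (f x).length = k := hlen x (by simp)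
    rw [List.flatMap_cons]
    by_cases hn : n < k
    · rw [List.getElem?_append_left (by omega)]
      rw [Nat.div_eq_of_lt hn, Nat.mod_eq_of_lt hn]
      simp
    · replace hn : k ≤ n := by omega
      rw [List.getElem?_append_right (by omega), hx,
        ih (fun a ha => hlen a (by simp [ha])) (n - k),
        Nat.div_eq_sub_div hk hn, Nat.mod_eq_sub_mod hn]
      simp

theorem pv_elem (p : Int) (h0 : 0 ≤ p) (h : p < 702) :
    pvElemA p = (PySem.List.pyGet? pvTable p).getD "" := by
  have hdiv : PySem.Int.floordiv p 26 = p / 26 :=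
    PySem.Int.floordiv_eq_ediv_of_pos (by omega)
  have hmod : PySem.Int.mod p 26 = p % 26 :=
    PySem.Int.mod_eq_emod_of_pos (by omega)
  have hlet : pvLetters.length = 26 := by decide
  unfold pvElemA
  rw [PySem.List.pyGet?_of_nonneg pvTable h0]
  unfold pvTable
  by_cases hp : 26 ≤ p
  · rw [if_pos hp]
    rw [List.getElem?_append_right (by simp [hlet]; omega)]
    rw [pv_flatMap_getElem? pvLetters _ 26 (by omega) (by intro a _; simp [hlet])]
    simp only [List.length_map, hlet]
    have hq1 : (p.toNat - 26) / 26 < 26 := by omega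
    have hq2 : (p.toNat - 26) % 26 < 26 := by omega
    rw [List.getElem?_eq_getElem (by omega)]
    simp only [Option.bind_some]
    rw [List.getElem?_map, List.getElem?_eq_getElem (by omega)]
    simp only [Option.map_some, Option.getD_some]
    have hi1 : (PySem.Int.floordiv p 26 - 1) = ((((p.toNat - 26) / 26 : Nat)) : Int) := by
      rw [hdiv]; omega
    have hi2 : (PySem.Int.mod p 26) = ((((p.toNat - 26) % 26 : Nat)) : Int) := by
      rw [hmod]; omega
    rw [hi1, hi2, PySem.List.pyGet?_natCast, PySem.List.pyGet?_natCast]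
    rw [List.getElem?_map, List.getElem?_eq_getElem (by omega),
      List.getElem?_map, List.getElem?_eq_getElem (by omega)]
    simp
  · rw [if_neg hp, PySem.List.pyGet?_of_nonneg _ h0,
      List.getElem?_append_left (by simp [hlet]; omega)]

theorem pv_B_map (size : Int) :
    letter_incrementer_alt size
      = (PySem.List.pyRange 0 size 1).map (fun p => (PySem.List.pyGet? pvTable p).getD "") := by
  rfl

theorem letter_incrementer_spec' (size : Int) (h : size ≤ 702) :
    letter_incrementer size = letter_incrementer_alt size := by
  rw [pv_A_map, pv_B_map]
  apply List.map_congr_left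
  intro x hx
  rw [PySem.List.mem_pyRange_one] at hx
  exact pv_elem x hx.1 (by omega)

-- ===== VERDICT (by name: the statement is the Claim_ definition above) =====
theorem letter_incrementer_spec : Claim_equal_letter_incrementer := by
  intro size _ hpre
  unfold Spec_letter_incrementer
  exact letter_incrementer_spec' size (by unfold Pre_letter_incrementer at hpre; omega)

set_option maxRecDepth 4000 in
def letter_incrementer_raises : Claim_raises_letter_incrementer := by
  unfold Claim_raises_letter_incrementer
  refine ⟨fun size _ hr => ?_, by decide⟩
  unfold Raises_letter_incrementer at hr
  unfold Pre_letter_incrementer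
  omega
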